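-- pv_equiv track=rewrite | github.com/mehrshadina/quera.ir_solutions | questions/ramz_palindrome.py | making_palindrome
-- ===== SOURCE A (Python) =====
-- def is_palindrome(s):
--     return s == s[::-1]
--
-- def making_palindrome(s):
--     before_edithing = s
--
--     s = s.replace('?', '+')
--     for i in range(len(s)):
--         if s[i] == '+':
--             s = s[:i] + s[::-1][i] + s[i+1:]
--     if is_palindrome(s):
--         return s
--     else:
--         return before_edithing
-- ===== SOURCE B (Python) =====
-- def making_palindrome(s):
--     t = s.replace('?', '+')
--     pairs = list(zip(t, t[::-1]))
--     if any(a != b and a != '+' and b != '+' for a, b in pairs):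
--         return s
--     return ''.join(b if a == '+' else a for a, b in pairs)
-- ===== Notes on version B (the rewrite author's own statement) =====
-- stated objective: alternative
-- what changed: A repeatedly rebuilds the whole string by slicing (s = s[:i] + s[::-1][i] + s[i+1:]) inside an index loop over positions and then runs a separate full palindrome check; B zips the '+'-substituted string with its reverse once, returns the original string on any hard letter mismatch, and otherwise joins each pair's resolved character, with no in-loop string rebuilding and no palindrome scan.
import Mathlib
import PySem

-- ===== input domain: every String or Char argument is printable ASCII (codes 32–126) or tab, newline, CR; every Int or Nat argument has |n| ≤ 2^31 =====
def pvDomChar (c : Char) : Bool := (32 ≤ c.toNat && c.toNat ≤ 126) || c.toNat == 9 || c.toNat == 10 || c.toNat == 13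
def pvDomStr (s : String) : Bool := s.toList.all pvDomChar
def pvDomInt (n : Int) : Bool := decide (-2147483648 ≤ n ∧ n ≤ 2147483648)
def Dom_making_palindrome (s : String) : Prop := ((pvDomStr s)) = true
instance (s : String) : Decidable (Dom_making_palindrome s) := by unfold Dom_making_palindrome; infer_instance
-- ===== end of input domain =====

-- B replaces A's self-rewriting index loop (rebuild the string by slicing at every '+',
-- then a full palindrome check) by a single zip of the string with its reverse, with an
-- early mismatch test instead of the final palindrome scan; objective: alternative.

-- ===== PORT A =====
-- is_palindrome(s): s == s[::-1]  (s[::-1] is reverse, PySem.List.slice?_none_none_neg_one)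
def is_palindrome (cs : List Char) : Bool := cs == cs.reverse

-- body of A's for-loop: s = s[:i] + s[::-1][i] + s[i+1:] when s[i] == '+'
def fillStep (c : List Char) (i : Int) : List Char :=
  if PySem.List.pyGetD c i ' ' == '+' then
    PySem.List.slice c none (some i) ++ [PySem.List.pyGetD c.reverse i ' ']
      ++ PySem.List.slice c (some (i + 1)) none
  else c

def making_palindrome (s : String) : String :=
  let before_edithing := s
  let t0 := PySem.Chars.replace s.toList ['?'] ['+']
  let t := (PySem.List.pyRange 0 (t0.length : Int) 1).foldl fillStep t0
  if is_palindrome t then String.ofList t else before_edithing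

-- ===== PORT B =====
def making_palindrome_alt (s : String) : String :=
  let t := PySem.Chars.replace s.toList ['?'] ['+']
  let pairs := t.zip t.reverse
  if pairs.any (fun p => p.1 != p.2 && p.1 != '+' && p.2 != '+') then s
  else String.ofList (pairs.map (fun p => if p.1 == '+' then p.2 else p.1))

-- ===== PRECONDITION & SPEC =====
def Spec_making_palindrome (s : String) (out : String) : Prop := out = making_palindrome_alt s
instance (s : String) (out : String) : Decidable (Spec_making_palindrome s out) := by unfold Spec_making_palindrome; infer_instance

-- ===== CLAIM (what is proved, stated in full; the proofs are below) =====
def Claim_equal_making_palindrome : Prop := ∀ (s : String), Dom_making_palindrome s → Spec_making_palindrome s (making_palindrome s)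

-- ===== LEMMAS AND PROOFS =====

-- the "filled" string: each '+' replaced by its mirror character
def fillAll (t : List Char) : List Char :=
  List.zipWith (fun a b => if a == '+' then b else a) t t.reverse

theorem length_fillAll (t : List Char) : (fillAll t).length = t.length := by
  simp [fillAll]

theorem getElem_fillAll (t : List Char) (k : Nat) (hk : k < t.length) :
    (fillAll t)[k]'(by simp [length_fillAll, hk]) =
      if t[k] == '+' then t[t.length - 1 - k]'(by omega) else t[k] := by
  simp [fillAll, List.getElem_zipWith, List.getElem_reverse]

theorem cur_get_self (t : List Char) (k : Nat) (hkl : k < t.length) :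
    ((fillAll t).take k ++ t.drop k)[k]'(by simp [length_fillAll]; omega) = t[k] := by
  simp [length_fillAll, Nat.min_eq_left hkl.le]

theorem cur_get_mirror (t : List Char) (k m : Nat) (hkl : k < t.length)
    (hm : m = t.length - 1 - k) (hplus : t[k]'hkl = '+') :
    ((fillAll t).take k ++ t.drop k)[m]'(by simp [length_fillAll]; omega) = t[m]'(by omega) := by
  by_cases hlt : m < k
  · simp only [List.getElem_append, length_fillAll, List.length_take, Nat.min_eq_left (le_of_lt hkl), hlt, dif_pos]
    rw [List.getElem_take, getElem_fillAll t m (by omega)]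
    have hidx : t.length - 1 - m = k := by omega
    simp only [hidx]
    by_cases hp : t[m]'(by omega) = '+' <;> simp [hp, hplus]
  · simp [List.getElem_append, length_fillAll, hlt]
    congr 1
    omega

theorem step_eq (t : List Char) (k : Nat) (hkl : k < t.length) :
    fillStep ((fillAll t).take k ++ t.drop k) (k : Int)
      = (fillAll t).take (k+1) ++ t.drop (k+1) := by
  have hltk : ((fillAll t).take k).length = k := by simp [length_fillAll]; omega
  have hlen : ((fillAll t).take k ++ t.drop k).length = t.length := by
    simp [length_fillAll]; omega
  have hget : PySem.List.pyGetD ((fillAll t).take k ++ t.drop k) (k : Int) ' ' = t[k] := by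
    rw [PySem.List.pyGetD_natCast, List.getD_eq_getElem _ _ (by omega), cur_get_self t k hkl]
  have htakesucc : (fillAll t).take (k+1)
      = (fillAll t).take k ++ [(fillAll t)[k]'(by simp [length_fillAll]; omega)] := by
    rw [List.take_add_one, List.getElem?_eq_getElem (by simp [length_fillAll]; omega)]
    rfl
  unfold fillStep
  rw [hget]
  by_cases hp : t[k] = '+'
  · rw [if_pos (by simp [hp])]
    have h1 : PySem.List.slice ((fillAll t).take k ++ t.drop k) none (some (k:Int))
        = (fillAll t).take k := by
      rw [PySem.List.slice_to_natCast, List.take_append_of_le_length (by omega), List.take_take]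
      simp
    have h2 : PySem.List.slice ((fillAll t).take k ++ t.drop k) (some ((k:Int)+1)) none
        = t.drop (k+1) := by
      have hc : ((k:Int)+1) = ((k+1:Nat):Int) := by push_cast; ring
      rw [hc, PySem.List.slice_from_natCast]
      have : k + 1 = ((fillAll t).take k).length + 1 := by omega
      rw [this, List.drop_length_add_append, List.drop_drop, hltk]
    have h3 : PySem.List.pyGetD ((fillAll t).take k ++ t.drop k).reverse (k:Int) ' '
        = t[t.length - 1 - k]'(by omega) := by
      rw [PySem.List.pyGetD_natCast, List.getD_eq_getElem _ _ (by rw [List.length_reverse, hlen]; omega),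
          List.getElem_reverse]
      simp only [hlen]
      exact cur_get_mirror t k (t.length - 1 - k) hkl rfl hp
    rw [h1, h2, h3, htakesucc]
    rw [getElem_fillAll t k hkl, if_pos (by simp [hp])]
    try simp
  · rw [if_neg (by simp [hp])]
    rw [htakesucc, getElem_fillAll t k hkl, if_neg (by simp [hp])]
    rw [List.drop_eq_getElem_cons hkl]
    simp

theorem loop_inv (t : List Char) (k : Nat) (hk : k ≤ t.length) :
    (PySem.List.pyRange 0 (k : Int) 1).foldl fillStep t = (fillAll t).take k ++ t.drop k := by
  induction k with
  | zero => simp [PySem.List.pyRange_one_eq_nil (le_refl (0:Int))]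
  | succ k ih =>
    have hkl : k < t.length := by omega
    have hcast : ((k+1 : Nat) : Int) = (k : Int) + 1 := by push_cast; ring
    rw [hcast, PySem.List.pyRange_one_succ_right (by exact_mod_cast Int.natCast_nonneg k),
        List.foldl_append, ih (by omega)]
    simpa using step_eq t k hkl

theorem any_iff (t : List Char) :
    ((t.zip t.reverse).any (fun p => p.1 != p.2 && p.1 != '+' && p.2 != '+') = false)
      ↔ ∀ k (hk : k < t.length), t[k] = t[t.length-1-k]'(by omega) ∨ t[k] = '+' ∨ t[t.length-1-k]'(by omega) = '+' := by
  rw [List.any_eq_false]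
  constructor
  · intro h k hk
    have hm : (t[k], t[t.length-1-k]'(by omega)) ∈ t.zip t.reverse := by
      rw [List.mem_iff_getElem]
      exact ⟨k, by simp [hk], by rw [List.getElem_zip]; simp [List.getElem_reverse]⟩
    have := h _ hm
    simp at this
    tauto
  · intro h p hp
    rw [List.mem_iff_getElem] at hp
    obtain ⟨k, hk, he⟩ := hp
    have hk' : k < t.length := by simp at hk; omega
    rw [List.getElem_zip] at he
    subst he
    have := h k hk'
    simp [List.getElem_reverse]
    tauto

theorem pal_iff (t : List Char) :
    (is_palindrome (fillAll t) = true)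
      ↔ ∀ k (hk : k < t.length), t[k] = t[t.length-1-k]'(by omega) ∨ t[k] = '+' ∨ t[t.length-1-k]'(by omega) = '+' := by
  simp only [is_palindrome, beq_iff_eq]
  constructor
  · intro hp k hk
    have h1 : (fillAll t)[k]'(by simp [length_fillAll, hk])
        = (fillAll t).reverse[k]'(by simp [length_fillAll]; omega) := List.getElem_of_eq hp _
    rw [List.getElem_reverse] at h1
    have hidx : (fillAll t).length - 1 - k = t.length - 1 - k := by rw [length_fillAll]
    simp only [hidx] at h1
    rw [getElem_fillAll t k hk, getElem_fillAll t (t.length - 1 - k) (by omega)] at h1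
    have hkk : t.length - 1 - (t.length - 1 - k) = k := by omega
    simp only [hkk] at h1
    by_cases ha : t[k] = '+' <;> by_cases hb : (t[t.length-1-k]'(by omega)) = '+' <;>
      (simp [ha, hb] at h1 ⊢; try tauto)
  · intro h
    apply List.ext_getElem (by simp)
    intro k h1 h2
    have hk : k < t.length := by simpa [length_fillAll] using h1
    rw [List.getElem_reverse]
    have hidx : (fillAll t).length - 1 - k = t.length - 1 - k := by rw [length_fillAll]
    simp only [hidx]
    rw [getElem_fillAll t k hk, getElem_fillAll t (t.length - 1 - k) (by omega)]
    have hkk : t.length - 1 - (t.length - 1 - k) = k := by omega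
    simp only [hkk]
    rcases h k hk with hab | ha | hb
    · simp [hab]
    · by_cases hb : (t[t.length-1-k]'(by omega)) = '+' <;> simp [ha, hb]
    · by_cases ha2 : t[k] = '+' <;> simp [ha2, hb]
theorem cond_iff (t : List Char) :
    (is_palindrome (fillAll t) = true)
      ↔ ((t.zip t.reverse).any (fun p => p.1 != p.2 && p.1 != '+' && p.2 != '+') = false) :=
  (pal_iff t).trans (any_iff t).symm

theorem map_zip_fill (t : List Char) :
    (t.zip t.reverse).map (fun p => if p.1 == '+' then p.2 else p.1) = fillAll t := by
  unfold fillAll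
  rw [List.zip]
  exact List.map_zipWith

-- ===== VERDICT (by name: the statement is the Claim_ definition above) =====
theorem foldl_fill (t : List Char) :
    (PySem.List.pyRange 0 (t.length : Int) 1).foldl fillStep t = fillAll t := by
  have := loop_inv t t.length le_rfl
  simpa [List.take_of_length_le (le_of_eq (length_fillAll t))] using this

theorem making_palindrome_spec : Claim_equal_making_palindrome := by
  intro s _
  show making_palindrome s = making_palindrome_alt s
  simp only [making_palindrome, making_palindrome_alt, foldl_fill, map_zip_fill]
  set t := PySem.Chars.replace s.toList ['?'] ['+'] with ht
  rcases h : (t.zip t.reverse).any (fun p => p.1 != p.2 && p.1 != '+' && p.2 != '+') with _ | _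
  · rw [if_pos ((cond_iff t).mpr h)]; simp
  · have hnp : ¬ (is_palindrome (fillAll t) = true) := by
      intro hp; rw [(cond_iff t).mp hp] at h; cases h
    rw [if_neg hnp]; simp
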